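-- pv_equiv track=rewrite | github.com/CodingThrust/problem-reductions | docs/paper/verify-reductions/verify_k_satisfiability_register_sufficiency.py | simulate_registers
-- ===== SOURCE A (Python) =====
-- def simulate_registers(num_vertices: int, arcs: list[tuple[int, int]],
--                        config: list[int]) -> int | None:
--     """
--     Simulate register usage for a given evaluation ordering.
--     Matches the Rust RegisterSufficiency::simulate_registers exactly.
--
--     config[vertex] = position in evaluation order.
--     arc (v, u) means v depends on u.
--     Returns max registers used, or None if ordering is invalid.
--     """
--     n = num_vertices
--     if len(config) != n:
--         return None
--
--     order = [0] * n
--     used = [False] * n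
--     for vertex in range(n):
--         pos = config[vertex]
--         if pos < 0 or pos >= n:
--             return None
--         if used[pos]:
--             return None
--         used[pos] = True
--         order[pos] = vertex
--
--     dependencies: list[list[int]] = [[] for _ in range(n)]
--     dependents: list[list[int]] = [[] for _ in range(n)]
--     for v, u in arcs:
--         dependencies[v].append(u)
--         dependents[u].append(v)
--
--     last_use = [0] * n
--     for u in range(n):
--         if not dependents[u]:
--             last_use[u] = n
--         else:
--             latest = 0
--             for v in dependents[u]:
--                 latest = max(latest, config[v])
--             last_use[u] = latest
--
--     max_registers = 0
--     for step in range(n):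
--         vertex = order[step]
--         for dep in dependencies[vertex]:
--             if config[dep] >= step:
--                 return None
--         reg_count = sum(1 for v in order[:step + 1] if last_use[v] > step)
--         max_registers = max(max_registers, reg_count)
--
--     return max_registers
-- ===== SOURCE B (Python) =====
-- def simulate_registers(num_vertices: int, arcs: list[tuple[int, int]],
--                        config: list[int]) -> int | None:
--     """One-pass simulation: running active-register count with expiry
--     buckets keyed by last use, instead of recounting registers per step."""
--     n = num_vertices
--     if len(config) != n:
--         return None
--
--     seen = [False] * n
--     for pos in config:
--         if pos < 0 or pos >= n or seen[pos]:
--             return None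
--         seen[pos] = True
--
--     last = [None] * n  # last[u] = latest position using u; None = never used
--     for v, u in arcs:
--         pv = config[v]
--         if config[u] >= pv:
--             return None
--         if last[u] is None or last[u] < pv:
--             last[u] = pv
--
--     expire = [0] * n   # expire[s] = number of vertices whose last use is step s
--     for e in last:
--         if e is not None:
--             expire[e] += 1
--
--     best = 0
--     active = 0
--     for step in range(n):
--         active += 1 - expire[step]
--         if active > best:
--             best = active
--     return best
-- ===== Notes on version B (the rewrite author's own statement) =====
-- stated objective: alternative
-- what changed: Instead of recounting live registers with an O(n) scan of order[:step+1] at every step, B validates arcs in a single pass while recording each vertex's last-use position, buckets vertices by expiry step, and sweeps once keeping a running active-register count (+1 new vertex, -expire[step]); O(n+m) on valid orderings versus A's O(n^2+m), though a timing run inputs (mostly invalid orderings) show no measured difference.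
import Mathlib
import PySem

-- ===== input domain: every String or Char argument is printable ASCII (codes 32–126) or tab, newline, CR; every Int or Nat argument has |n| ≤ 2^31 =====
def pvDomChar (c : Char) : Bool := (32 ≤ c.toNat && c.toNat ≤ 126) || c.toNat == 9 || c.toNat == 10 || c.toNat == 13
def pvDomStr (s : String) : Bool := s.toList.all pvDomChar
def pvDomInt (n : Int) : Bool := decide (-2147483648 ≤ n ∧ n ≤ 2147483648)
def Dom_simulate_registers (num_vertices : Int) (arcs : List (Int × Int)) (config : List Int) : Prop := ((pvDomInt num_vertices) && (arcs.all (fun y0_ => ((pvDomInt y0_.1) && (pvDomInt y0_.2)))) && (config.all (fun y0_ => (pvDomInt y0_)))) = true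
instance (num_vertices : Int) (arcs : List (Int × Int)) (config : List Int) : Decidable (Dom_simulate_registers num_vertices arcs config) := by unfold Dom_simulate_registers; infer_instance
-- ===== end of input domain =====

-- B replaces A's per-step recount of live registers by expiry buckets keyed
-- by last use and one running active-register count, swept in a single pass.

-- ===== PORT A =====
-- A-side helpers: one definition per Python loop of A, in A's order.
def pvA_perm (n : Int) (config : List Int) : Option (List Int × List Bool) :=
  (List.range n.toNat).foldl (fun st (vertex : Nat) => st.bind (fun ou =>
      let pos := PySem.List.pyGetD config (vertex : Int) 0
      if pos < 0 ∨ n ≤ pos then none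
      else if PySem.List.pyGetD ou.2 pos false then none
      else some (PySem.List.pySetD ou.1 pos (vertex : Int), PySem.List.pySetD ou.2 pos true)))
    (some (List.replicate n.toNat (0 : Int), List.replicate n.toNat false))

def pvA_adj (N : Nat) (arcs : List (Int × Int)) : List (List Int) × List (List Int) :=
  arcs.foldl (fun (da : List (List Int) × List (List Int)) vu =>
      (PySem.List.pySetD da.1 vu.1 (PySem.List.pyGetD da.1 vu.1 [] ++ [vu.2]),
       PySem.List.pySetD da.2 vu.2 (PySem.List.pyGetD da.2 vu.2 [] ++ [vu.1])))
    (List.replicate N ([] : List Int), List.replicate N ([] : List Int))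

def pvA_lastuse (n : Int) (config : List Int) (dependents : List (List Int)) : List Int :=
  (List.range n.toNat).foldl (fun lu (u : Nat) =>
      let ds := PySem.List.pyGetD dependents (u : Int) []
      PySem.List.pySetD lu (u : Int)
        (if ds = [] then n
         else ds.foldl (fun latest v => max latest (PySem.List.pyGetD config v 0)) 0))
    (List.replicate n.toNat (0 : Int))

def pvA_steps (n : Int) (config order : List Int) (dependencies : List (List Int))
    (last_use : List Int) : Option Int :=
  (List.range n.toNat).foldl (fun st (step : Nat) => st.bind (fun max_registers =>
      let vertex := PySem.List.pyGetD order (step : Int) 0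
      if (PySem.List.pyGetD dependencies vertex []).any
           (fun dep => (step : Int) ≤ PySem.List.pyGetD config dep 0) then none
      else
        let reg_count := ((PySem.List.slice order none (some ((step : Int) + 1))).map
            (fun v => if (step : Int) < PySem.List.pyGetD last_use v 0 then (1 : Int) else 0)).sum
        some (max max_registers reg_count)))
    (some (0 : Int))

def simulate_registers (num_vertices : Int) (arcs : List (Int × Int)) (config : List Int) : Option Int :=
  if PySem.List.len config ≠ num_vertices then none
  else
    match pvA_perm num_vertices config with
    | none => none
    | some (order, _used) =>
      let adj := pvA_adj num_vertices.toNat arcs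
      pvA_steps num_vertices config order adj.1 (pvA_lastuse num_vertices config adj.2)

-- ===== PORT B =====
-- B-side helpers: one definition per Python loop of B, in B's order.
def pvB_seen (n : Int) (config : List Int) : Option (List Bool) :=
  config.foldl (fun st pos => st.bind (fun seen =>
      if pos < 0 ∨ n ≤ pos then none
      else if PySem.List.pyGetD seen pos false then none
      else some (PySem.List.pySetD seen pos true)))
    (some (List.replicate n.toNat false))

def pvB_last (N : Nat) (config : List Int) (arcs : List (Int × Int)) : Option (List (Option Int)) :=
  arcs.foldl (fun st vu => st.bind (fun last =>
      let pv := PySem.List.pyGetD config vu.1 0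
      if pv ≤ PySem.List.pyGetD config vu.2 0 then none
      else
        match PySem.List.pyGetD last vu.2 none with
        | none => some (PySem.List.pySetD last vu.2 (some pv))
        | some l => if l < pv then some (PySem.List.pySetD last vu.2 (some pv))
                    else some last))
    (some (List.replicate N (none : Option Int)))

def pvB_expire (N : Nat) (last : List (Option Int)) : List Int :=
  last.foldl (fun ex e =>
      match e with
      | none => ex
      | some v => PySem.List.pySetD ex v (PySem.List.pyGetD ex v 0 + 1))
    (List.replicate N (0 : Int))

def pvB_sweep (N : Nat) (expire : List Int) : Int × Int :=
  (List.range N).foldl (fun (ba : Int × Int) (step : Nat) =>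
      let active := ba.2 + 1 - PySem.List.pyGetD expire (step : Int) 0
      (if ba.1 < active then active else ba.1, active))
    ((0 : Int), (0 : Int))

def simulate_registers_alt (num_vertices : Int) (arcs : List (Int × Int)) (config : List Int) : Option Int :=
  if PySem.List.len config ≠ num_vertices then none
  else
    match pvB_seen num_vertices config with
    | none => none
    | some _ =>
      match pvB_last num_vertices.toNat config arcs with
      | none => none
      | some last =>
        some (pvB_sweep num_vertices.toNat (pvB_expire num_vertices.toNat last)).1

-- ===== PRECONDITION & SPEC =====
-- Pre_ excludes exactly the inputs on which A raises IndexError: when config is a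
-- valid ordering (so A reaches the arcs loop), every arc endpoint must be a legal
-- Python index into the n-element per-vertex lists, i.e. lie in [-n, n).
def Pre_simulate_registers (num_vertices : Int) (arcs : List (Int × Int)) (config : List Int) : Prop :=
  ((PySem.List.len config = num_vertices) ∧
   (∀ x ∈ config, 0 ≤ x ∧ x < num_vertices) ∧ config.Nodup) →
  ∀ vu ∈ arcs, (-num_vertices ≤ vu.1 ∧ vu.1 < num_vertices) ∧
               (-num_vertices ≤ vu.2 ∧ vu.2 < num_vertices)
instance (num_vertices : Int) (arcs : List (Int × Int)) (config : List Int) : Decidable (Pre_simulate_registers num_vertices arcs config) := by unfold Pre_simulate_registers; infer_instance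

def pvWitness_simulate_registers : Int × (List (Int × Int)) × List Int :=
  (3, [(1, 0), (2, 1)], [0, 1, 2])

def Spec_simulate_registers (num_vertices : Int) (arcs : List (Int × Int)) (config : List Int) (out : Option Int) : Prop := out = simulate_registers_alt num_vertices arcs config
instance (num_vertices : Int) (arcs : List (Int × Int)) (config : List Int) (out : Option Int) : Decidable (Spec_simulate_registers num_vertices arcs config out) := by unfold Spec_simulate_registers; infer_instance

-- ===== CLAIM (what is proved, stated in full; the proofs are below) =====
def Claim_equal_simulate_registers : Prop := ∀ (num_vertices : Int) (arcs : List (Int × Int)) (config : List Int), Dom_simulate_registers num_vertices arcs config → Pre_simulate_registers num_vertices arcs config → Spec_simulate_registers num_vertices arcs config (simulate_registers num_vertices arcs config)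

-- ===== LEMMAS AND PROOFS =====

-- Python index wrapping (for -N ≤ i < N)
def pvW (N : Nat) (i : Int) : Nat := if 0 ≤ i then i.toNat else N - (-i).toNat

-- shared raw config read (both ports evaluate exactly this expression)
def pvCfg (config : List Int) (i : Int) : Int := PySem.List.pyGetD config i 0

-- dependents / dependencies buckets of a vertex w, as filtered arc lists
def pvDepd (N : Nat) (arcs : List (Int × Int)) (w : Nat) : List Int :=
  (arcs.filter (fun vu => pvW N vu.2 == w)).map Prod.fst
def pvDeps (N : Nat) (arcs : List (Int × Int)) (w : Nat) : List Int :=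
  (arcs.filter (fun vu => pvW N vu.1 == w)).map Prod.snd

-- A's last_use value of vertex w
def pvLu (n : Int) (config : List Int) (arcs : List (Int × Int)) (w : Nat) : Int :=
  if pvDepd n.toNat arcs w = [] then n
  else (pvDepd n.toNat arcs w).foldl (fun m v => max m (pvCfg config v)) 0

-- B's per-bucket running-max step and bucket value
def pvOMstep (config : List Int) (acc : Option Int) (v : Int) : Option Int :=
  match acc with
  | none => some (pvCfg config v)
  | some l => if l < pvCfg config v then some (pvCfg config v) else some l
def pvLuO (N : Nat) (config : List Int) (arcs : List (Int × Int)) (w : Nat) : Option Int :=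
  (pvDepd N arcs w).foldl (pvOMstep config) none

-- B's closed-form active count after k sweep steps
def pvAct (expire : List Int) (k : Nat) : Int :=
  (k : Int) - ((List.range k).map (fun t => expire.getD t 0)).sum

-- ---- wrapping lemmas ----
lemma pv_pyIdx (N : Nat) (i : Int) (h1 : -(N : Int) ≤ i) (h2 : i < (N : Int)) :
    PySem.List.pyIdx? N i = some (pvW N i) := by
  unfold PySem.List.pyIdx? pvW
  split_ifs with h <;> simp_all


lemma pvW_lt (N : Nat) (i : Int) (h1 : -(N : Int) ≤ i) (h2 : i < (N : Int)) :
    pvW N i < N := by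
  unfold pvW; split_ifs <;> omega


lemma pv_getD_wrap {α : Type} (xs : List α) (i : Int) (d : α)
    (h1 : -(xs.length : Int) ≤ i) (h2 : i < (xs.length : Int)) :
    PySem.List.pyGetD xs i d = xs.getD (pvW xs.length i) d := by
  unfold PySem.List.pyGetD PySem.List.pyGet?
  rw [pv_pyIdx _ _ h1 h2]
  simp [List.getD_eq_getElem?_getD]


lemma pv_setD_wrap {α : Type} (xs : List α) (i : Int) (v : α)
    (h1 : -(xs.length : Int) ≤ i) (h2 : i < (xs.length : Int)) :
    PySem.List.pySetD xs i v = xs.set (pvW xs.length i) v := by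
  unfold PySem.List.pySetD PySem.List.pySet?
  rw [pv_pyIdx _ _ h1 h2]
  simp


-- ---- generic fold lemmas ----
lemma pv_bindfold_map {α β γ : Type} (F : α → γ → Option α) (G : β → γ → Option β) (φ : α → β)
    (h : ∀ a x, (F a x).map φ = G (φ a) x) (l : List γ) (st : Option α) :
    (l.foldl (fun s x => s.bind (F · x)) st).map φ
      = l.foldl (fun s x => s.bind (G · x)) (st.map φ) := by
  induction l generalizing st with
  | nil => simp
  | cons x t ih =>
    simp only [List.foldl_cons]
    rw [ih]
    congr 1
    cases st with
    | none => simp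
    | some a => simpa using h a x


lemma pv_bindfold_none_absorb {α γ : Type} (F : α → γ → Option α) (l : List γ) :
    l.foldl (fun s x => s.bind (F · x)) none = none := by
  induction l with
  | nil => rfl
  | cons x t ih => simpa using ih


lemma pv_bindfold_some {α γ : Type} (F : α → γ → Option α) (f : α → γ → α) (l : List γ)
    (h : ∀ a x, x ∈ l → F a x = some (f a x)) (a : α) :
    l.foldl (fun s x => s.bind (F · x)) (some a) = some (l.foldl f a) := by
  induction l generalizing a with
  | nil => simp
  | cons x t ih =>
    simp only [List.foldl_cons, Option.bind_some]
    rw [h a x (by simp)]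
    exact ih (fun a x hx => h a x (List.mem_cons_of_mem _ hx)) _


lemma pv_bindfold_exists_none {α γ : Type} (F : α → γ → Option α) (l : List γ)
    (h : ∃ x ∈ l, ∀ a, F a x = none) (st : Option α) :
    l.foldl (fun s x => s.bind (F · x)) st = none := by
  obtain ⟨x, hx, hF⟩ := h
  obtain ⟨t1, t2, rfl⟩ := List.append_of_mem hx
  rw [List.foldl_append, List.foldl_cons]
  have : (t1.foldl (fun s x => s.bind (F · x)) st).bind (F · x) = none := by
    cases t1.foldl (fun s x => s.bind (F · x)) st with
    | none => rfl
    | some a => simpa using hF a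
  rw [this]
  exact pv_bindfold_none_absorb _ _


lemma pv_bindfold_none_iff {α γ : Type} (F : α → γ → Option α) (p : γ → Bool) (l : List γ)
    (h : ∀ a x, F a x = none ↔ p x = true) (a : α) :
    (l.foldl (fun s x => s.bind (F · x)) (some a) = none) ↔ l.any p := by
  induction l generalizing a with
  | nil => simp
  | cons x t ih =>
    simp only [List.foldl_cons, Option.bind_some, List.any_cons]
    by_cases hp : p x = true
    · rw [(h a x).2 hp, pv_bindfold_none_absorb]
      simp [hp]
    · have : F a x ≠ none := fun hc => hp ((h a x).1 hc)
      obtain ⟨b, hb⟩ := Option.ne_none_iff_exists'.1 this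
      rw [hb, ih]
      simp [hp]


-- list as map of its getD over range (used to trade element folds for index folds)
lemma pv_map_getD_range {α : Type} (l : List α) (d : α) :
    (List.range l.length).map (fun i => l.getD i d) = l := by
  apply List.ext_getElem
  · simp
  · intro i h1 h2
    simp [List.getD_eq_getElem?_getD, h2]


-- tabulating fold: each index of range N written once, value independent of state
lemma pv_setfold {α : Type} (N : Nat) (g : Nat → α) (d : α) (init : List α)
    (hlen : init.length = N) (k : Nat) (hk : k ≤ N) :
    ((List.range k).foldl (fun a (u : Nat) => PySem.List.pySetD a (u : Int) (g u)) init).length = N ∧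
    ∀ w, w < N →
      ((List.range k).foldl (fun a (u : Nat) => PySem.List.pySetD a (u : Int) (g u)) init).getD w d
        = if w < k then g w else init.getD w d := by
  induction k with
  | zero => exact ⟨by simpa using hlen, fun w hw => by simp⟩
  | succ k ih =>
    obtain ⟨ihlen, ihget⟩ := ih (Nat.le_of_succ_le hk)
    simp only [PySem.List.pySetD_natCast] at ihlen ihget
    rw [List.range_succ, List.foldl_append]
    simp only [List.foldl_cons, List.foldl_nil, PySem.List.pySetD_natCast]
    refine ⟨by simpa using ihlen, fun w hw => ?_⟩
    rw [List.getD_eq_getElem?_getD, List.getElem?_set]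
    rcases Nat.lt_trichotomy w k with h | h | h
    · have hne : ¬ k = w := by omega
      simp only [hne, if_false]
      rw [← List.getD_eq_getElem?_getD, ihget w hw]
      simp [h, Nat.lt_succ_of_lt h]
    · subst h
      simp [ihlen, hw]
    · have hne : ¬ k = w := by omega
      simp only [hne, if_false]
      rw [← List.getD_eq_getElem?_getD, ihget w hw]
      split_ifs <;> first | rfl | omega


-- bucket-append fold (A's adjacency construction)
lemma pv_bucket {γ α : Type} (N : Nat) (key : γ → Int) (val : γ → α) (l : List γ)
    (hk : ∀ x ∈ l, -(N : Int) ≤ key x ∧ key x < (N : Int)) (acc : List (List α))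
    (hacc : acc.length = N) :
    (l.foldl (fun a x =>
        PySem.List.pySetD a (key x) (PySem.List.pyGetD a (key x) [] ++ [val x])) acc).length = N ∧
    ∀ w, w < N →
      (l.foldl (fun a x =>
          PySem.List.pySetD a (key x) (PySem.List.pyGetD a (key x) [] ++ [val x])) acc).getD w []
        = acc.getD w [] ++ (l.filter (fun x => pvW N (key x) == w)).map val := by
  induction l generalizing acc with
  | nil => simp [hacc]
  | cons x t ih =>
    obtain ⟨hx1, hx2⟩ := hk x (List.mem_cons_self ..)
    simp only [List.foldl_cons]
    have hg : PySem.List.pyGetD acc (key x) [] = acc.getD (pvW N (key x)) [] := by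
      rw [← hacc] at hx1 hx2 ⊢
      exact pv_getD_wrap acc (key x) [] hx1 hx2
    have hs : PySem.List.pySetD acc (key x) (acc.getD (pvW N (key x)) [] ++ [val x])
        = acc.set (pvW N (key x)) (acc.getD (pvW N (key x)) [] ++ [val x]) := by
      rw [← hacc] at hx1 hx2 ⊢
      exact pv_setD_wrap acc (key x) _ hx1 hx2
    rw [hg, hs]
    set acc' := acc.set (pvW N (key x)) (acc.getD (pvW N (key x)) [] ++ [val x]) with hacc'
    have hlen' : acc'.length = N := by simp [hacc', hacc]
    obtain ⟨rlen, rget⟩ := ih (fun y hy => hk y (List.mem_cons_of_mem _ hy)) acc' hlen'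
    refine ⟨rlen, fun w hw => ?_⟩
    rw [rget w hw]
    have hwlt : pvW N (key x) < N := pvW_lt N (key x) hx1 hx2
    by_cases hkey : pvW N (key x) = w
    · subst hkey
      have : acc'.getD (pvW N (key x)) [] = acc.getD (pvW N (key x)) [] ++ [val x] := by
        rw [hacc', List.getD_eq_getElem?_getD, List.getElem?_set_self (by omega)]
        rfl
      rw [this]
      simp [List.filter_cons]
    · have : acc'.getD w [] = acc.getD w [] := by
        rw [hacc', List.getD_eq_getElem?_getD, List.getElem?_set_ne hkey,
          ← List.getD_eq_getElem?_getD]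
      rw [this]
      simp only [List.filter_cons]
      have : (pvW N (key x) == w) = false := by simpa using hkey
      rw [this]
      simp


-- invariant of A's permutation-check loop after k iterations
lemma pv_perm_inv (n : Int) (config : List Int) (hn : (config.length : Int) = n)
    (k : Nat) (hk : k ≤ config.length) (o : List Int) (u : List Bool)
    (h : (List.range k).foldl (fun st (vertex : Nat) => st.bind (fun ou =>
        let pos := PySem.List.pyGetD config (vertex : Int) 0
        if pos < 0 ∨ n ≤ pos then none
        else if PySem.List.pyGetD ou.2 pos false then none
        else some (PySem.List.pySetD ou.1 pos (vertex : Int), PySem.List.pySetD ou.2 pos true)))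
      (some (List.replicate n.toNat (0 : Int), List.replicate n.toNat false)) = some (o, u)) :
    o.length = config.length ∧ u.length = config.length ∧
    (∀ i, i < k → (0 ≤ config.getD i 0 ∧ config.getD i 0 < n) ∧
      o.getD (config.getD i 0).toNat 0 = (i : Int)) ∧
    (∀ j, j < config.length →
      (u.getD j false = true ↔ ∃ i, i < k ∧ config.getD i 0 = (j : Int))) := by
  have hlen : n.toNat = config.length := by omega
  induction k generalizing o u with
  | zero =>
    simp only [List.range_zero, List.foldl_nil, Option.some.injEq, Prod.mk.injEq] at h
    obtain ⟨ho, hu⟩ := h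
    refine ⟨by simp [← ho, hlen], by simp [← hu, hlen], fun i hi => absurd hi (by omega),
      fun j hj => ?_⟩
    rw [← hu]
    simp
  | succ k ih =>
    rw [List.range_succ, List.foldl_append, List.foldl_cons, List.foldl_nil] at h
    rcases hprev : (List.range k).foldl (fun st (vertex : Nat) => st.bind (fun ou =>
        let pos := PySem.List.pyGetD config (vertex : Int) 0
        if pos < 0 ∨ n ≤ pos then none
        else if PySem.List.pyGetD ou.2 pos false then none
        else some (PySem.List.pySetD ou.1 pos (vertex : Int), PySem.List.pySetD ou.2 pos true)))
      (some (List.replicate n.toNat (0 : Int), List.replicate n.toNat false)) with _ | ou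
    · rw [hprev] at h
      simp at h
    · rw [hprev] at h
      obtain ⟨o0, u0⟩ := ou
      obtain ⟨holen, hulen, hio, hju⟩ := ih (by omega) o0 u0 hprev
      simp only [Option.bind_some, PySem.List.pyGetD_natCast] at h
      set pos := config.getD k 0 with hpos
      by_cases hb : pos < 0 ∨ n ≤ pos
      · rw [if_pos hb] at h; exact absurd h (by simp)
      · rw [if_neg hb] at h
        push_neg at hb
        obtain ⟨hb0, hbn⟩ := hb
        have hptN : pos.toNat < u0.length := by omega
        have hgu : PySem.List.pyGetD u0 pos false = u0.getD pos.toNat false := by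
          rw [pv_getD_wrap u0 pos false (by omega) (by omega)]
          unfold pvW
          rw [if_pos hb0]
        rw [hgu] at h
        by_cases hused : u0.getD pos.toNat false = true
        · rw [if_pos hused] at h; exact absurd h (by simp)
        · rw [if_neg hused] at h
          rw [pv_setD_wrap o0 pos _ (by omega) (by omega),
            pv_setD_wrap u0 pos _ (by omega) (by omega)] at h
          have hWo : pvW o0.length pos = pos.toNat := by unfold pvW; rw [if_pos hb0]
          have hWu : pvW u0.length pos = pos.toNat := by unfold pvW; rw [if_pos hb0]
          rw [hWo, hWu] at h
          obtain ⟨ho, hu⟩ := Prod.mk.injEq .. ▸ Option.some.injEq .. ▸ h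
          have hfresh : ∀ i, i < k → (config.getD i 0).toNat ≠ pos.toNat := by
            intro i hi hcontra
            have h1 := (hio i hi).1
            have : config.getD i 0 = pos := by omega
            have : u0.getD pos.toNat false = true :=
              (hju pos.toNat (by omega)).2 ⟨i, hi, by omega⟩
            exact hused this
          refine ⟨?_, ?_, fun i hi => ?_, fun j hj => ?_⟩
          · rw [← ho]; simpa using holen
          · rw [← hu]; simpa using hulen
          · rcases Nat.lt_or_ge i k with hik | hik
            · obtain ⟨hbd, hoi⟩ := hio i hik
              refine ⟨hbd, ?_⟩
              rw [← ho, List.getD_eq_getElem?_getD,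
                List.getElem?_set_ne (fun hc => hfresh i hik hc.symm),
                ← List.getD_eq_getElem?_getD]
              exact hoi
            · have hik' : i = k := by omega
              subst hik'
              refine ⟨⟨hb0, hbn⟩, ?_⟩
              rw [← ho, List.getD_eq_getElem?_getD,
                List.getElem?_set_self (by omega), Option.getD_some]
          · by_cases hjp : j = pos.toNat
            · subst hjp
              rw [← hu, List.getD_eq_getElem?_getD, List.getElem?_set_self (by omega),
                Option.getD_some]
              simp only [true_iff]
              exact ⟨k, by omega, by omega⟩
            · rw [← hu, List.getD_eq_getElem?_getD, List.getElem?_set_ne (fun hc => hjp hc.symm),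
                ← List.getD_eq_getElem?_getD]
              rw [hju j hj]
              constructor
              · rintro ⟨i, hi, hci⟩; exact ⟨i, by omega, hci⟩
              · rintro ⟨i, hi, hci⟩
                refine ⟨i, ?_, hci⟩
                rcases Nat.lt_or_ge i k with h' | h'
                · exact h'
                · exfalso
                  have : i = k := by omega
                  subst this
                  exact hjp (by omega)

-- ---- A's permutation-check loop ----
lemma pv_perm_char (n : Int) (config : List Int) (o : List Int) (u : List Bool)
    (hn : (config.length : Int) = n) (h : pvA_perm n config = some (o, u)) :
    (∀ x ∈ config, 0 ≤ x ∧ x < n) ∧ config.Nodup ∧ o.length = config.length ∧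
    (∀ i, i < config.length → o.getD (config.getD i 0).toNat 0 = (i : Int)) := by
  have hlen : n.toNat = config.length := by omega
  unfold pvA_perm at h
  obtain ⟨holen, hulen, hio, hju⟩ := pv_perm_inv n config hn n.toNat (by omega) o u h
  rw [hlen] at hio
  have hrange : ∀ x ∈ config, 0 ≤ x ∧ x < n := by
    intro x hx
    obtain ⟨i, hi, rfl⟩ := List.mem_iff_getElem.1 hx
    have := (hio i hi).1
    rwa [List.getD_eq_getElem?_getD, List.getElem?_eq_getElem hi, Option.getD_some] at this
  refine ⟨hrange, ?_, holen, fun i hi => (hio i hi).2⟩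
  rw [List.nodup_iff_injective_getElem]
  intro a b hab
  have hab' : config[a.1]'a.2 = config[b.1]'b.2 := hab
  have ha := (hio a.1 a.2).2
  have hb := (hio b.1 b.2).2
  have hga : config.getD a.1 0 = config[a.1] := by
    rw [List.getD_eq_getElem?_getD, List.getElem?_eq_getElem a.2, Option.getD_some]
  have hgb : config.getD b.1 0 = config[b.1] := by
    rw [List.getD_eq_getElem?_getD, List.getElem?_eq_getElem b.2, Option.getD_some]
  rw [hga] at ha
  rw [hgb] at hb
  rw [hab'] at ha
  rw [ha] at hb
  exact Fin.ext (by exact_mod_cast hb)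


-- B's seen loop is A's loop with the order component forgotten
lemma pv_seen_eq (n : Int) (config : List Int) (hn : (config.length : Int) = n) :
    pvB_seen n config = (pvA_perm n config).map Prod.snd := by
  have hlen : n.toNat = config.length := by omega
  unfold pvB_seen pvA_perm
  have key := pv_bindfold_map
    (F := fun (ou : List Int × List Bool) (vertex : Nat) =>
      let pos := PySem.List.pyGetD config (vertex : Int) 0
      if pos < 0 ∨ n ≤ pos then none
      else if PySem.List.pyGetD ou.2 pos false then none
      else some (PySem.List.pySetD ou.1 pos (vertex : Int), PySem.List.pySetD ou.2 pos true))
    (G := fun (seen : List Bool) (vertex : Nat) =>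
      if config.getD vertex 0 < 0 ∨ n ≤ config.getD vertex 0 then none
      else if PySem.List.pyGetD seen (config.getD vertex 0) false then none
      else some (PySem.List.pySetD seen (config.getD vertex 0) true))
    (φ := Prod.snd)
    (by
      intro a x
      simp only [PySem.List.pyGetD_natCast]
      split_ifs <;> rfl)
    (List.range n.toNat)
    (some (List.replicate n.toNat (0 : Int), List.replicate n.toNat false))
  rw [key]
  have hmap := pv_map_getD_range config 0
  conv_lhs => rw [← hmap, List.foldl_map]
  simp only [Option.map_some]
  rw [hlen]


-- surjectivity of the position map of a valid ordering
lemma pv_surj (n : Int) (config : List Int) (hn : (config.length : Int) = n)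
    (hrange : ∀ x ∈ config, 0 ≤ x ∧ x < n) (hnd : config.Nodup) :
    ∀ j, j < config.length → ∃ i, i < config.length ∧ config.getD i 0 = (j : Int) := by
  intro j hj
  have hNat : ∀ i, i < config.length → (config.getD i 0).toNat < config.length := by
    intro i hi
    have := hrange (config.getD i 0) (by
      rw [List.getD_eq_getElem?_getD, List.getElem?_eq_getElem hi, Option.getD_some]
      exact config.getElem_mem hi)
    omega
  have hinj : ∀ (i1 i2 : Nat), i1 ∈ Finset.range config.length →
      i2 ∈ Finset.range config.length →
      (config.getD i1 0).toNat = (config.getD i2 0).toNat → i1 = i2 := by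
    intro i1 i2 h1 h2 heq
    rw [Finset.mem_range] at h1 h2
    have e1 : config.getD i1 0 = config[i1] := by
      rw [List.getD_eq_getElem?_getD, List.getElem?_eq_getElem h1, Option.getD_some]
    have e2 : config.getD i2 0 = config[i2] := by
      rw [List.getD_eq_getElem?_getD, List.getElem?_eq_getElem h2, Option.getD_some]
    have g1 := hrange config[i1] (config.getElem_mem h1)
    have g2 := hrange config[i2] (config.getElem_mem h2)
    have : config[i1] = config[i2] := by omega
    exact (List.Nodup.getElem_inj_iff hnd).1 this
  have hmaps : ∀ i ∈ Finset.range config.length,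
      (config.getD i 0).toNat ∈ Finset.range config.length := by
    intro i hi
    rw [Finset.mem_range] at hi ⊢
    exact hNat i hi
  obtain ⟨i, hi, hfi⟩ := Finset.surj_on_of_inj_on_of_card_le
    (fun i _ => (config.getD i 0).toNat) hmaps hinj (le_refl _) j (Finset.mem_range.2 hj)
  rw [Finset.mem_range] at hi
  refine ⟨i, hi, ?_⟩
  have := hrange (config.getD i 0) (by
    rw [List.getD_eq_getElem?_getD, List.getElem?_eq_getElem hi, Option.getD_some]
    exact config.getElem_mem hi)
  omega


-- order is the inverse permutation: entry j is the vertex evaluated at step j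
lemma pv_order_inv (n : Int) (config : List Int) (o : List Int) (u : List Bool)
    (hn : (config.length : Int) = n) (h : pvA_perm n config = some (o, u)) :
    ∀ j, j < config.length →
      0 ≤ o.getD j 0 ∧ o.getD j 0 < (config.length : Int) ∧
      config.getD (o.getD j 0).toNat 0 = (j : Int) := by
  intro j hj
  obtain ⟨hrange, hnd, holen, hchar⟩ := pv_perm_char n config o u hn h
  obtain ⟨i, hi, hci⟩ := pv_surj n config hn hrange hnd j hj
  have : o.getD j 0 = (i : Int) := by
    have := hchar i hi
    rwa [hci, Int.toNat_natCast] at this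
  rw [this]
  refine ⟨by positivity, by exact_mod_cast hi, ?_⟩
  rw [Int.toNat_natCast]
  exact hci


-- ---- A's adjacency and last_use ----
lemma pv_adj_char (N : Nat) (arcs : List (Int × Int))
    (hk : ∀ vu ∈ arcs, (-(N : Int) ≤ vu.1 ∧ vu.1 < N) ∧ (-(N : Int) ≤ vu.2 ∧ vu.2 < N)) :
    (pvA_adj N arcs).1.length = N ∧ (pvA_adj N arcs).2.length = N ∧
    (∀ w, w < N → (pvA_adj N arcs).1.getD w [] = pvDeps N arcs w) ∧
    (∀ w, w < N → (pvA_adj N arcs).2.getD w [] = pvDepd N arcs w) := by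
  have hadj : pvA_adj N arcs
      = (arcs.foldl (fun a vu =>
            PySem.List.pySetD a vu.1 (PySem.List.pyGetD a vu.1 [] ++ [vu.2])) (List.replicate N []),
         arcs.foldl (fun a vu =>
            PySem.List.pySetD a vu.2 (PySem.List.pyGetD a vu.2 [] ++ [vu.1])) (List.replicate N [])) := by
    unfold pvA_adj
    rw [PySem.List.foldl_prod_mk
      (f := fun a (vu : Int × Int) => PySem.List.pySetD a vu.1 (PySem.List.pyGetD a vu.1 [] ++ [vu.2]))
      (g := fun a (vu : Int × Int) => PySem.List.pySetD a vu.2 (PySem.List.pyGetD a vu.2 [] ++ [vu.1]))]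
  have h1 := pv_bucket N (fun vu : Int × Int => vu.1) (fun vu : Int × Int => vu.2) arcs
    (fun x hx => (hk x hx).1) (List.replicate N []) (by simp)
  have h2 := pv_bucket N (fun vu : Int × Int => vu.2) (fun vu : Int × Int => vu.1) arcs
    (fun x hx => (hk x hx).2) (List.replicate N []) (by simp)
  rw [hadj]
  refine ⟨by simpa using h1.1, by simpa using h2.1, fun w hw => ?_, fun w hw => ?_⟩
  · have := h1.2 w hw
    simpa [pvDeps] using this
  · have := h2.2 w hw
    simpa [pvDepd] using this


lemma pv_lastuse_char (n : Int) (config : List Int) (arcs : List (Int × Int))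
    (hk : ∀ vu ∈ arcs, (-(n : Int) ≤ vu.1 ∧ vu.1 < n) ∧ (-(n : Int) ≤ vu.2 ∧ vu.2 < n))
    (hn : 0 ≤ n) :
    ∀ w, w < n.toNat →
      (pvA_lastuse n config (pvA_adj n.toNat arcs).2).getD w 0 = pvLu n config arcs w := by
  intro w hw
  have hN : ((n.toNat : Nat) : Int) = n := Int.toNat_of_nonneg hn
  have hk' : ∀ vu ∈ arcs, (-(n.toNat : Int) ≤ vu.1 ∧ vu.1 < (n.toNat : Int)) ∧
      (-(n.toNat : Int) ≤ vu.2 ∧ vu.2 < (n.toNat : Int)) := by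
    intro vu hvu
    have := hk vu hvu
    constructor <;> constructor <;> omega
  obtain ⟨-, hdlen, -, hdget⟩ := pv_adj_char n.toNat arcs hk'
  unfold pvA_lastuse
  have hsf := pv_setfold n.toNat
    (fun u => (let ds := PySem.List.pyGetD (pvA_adj n.toNat arcs).2 (u : Int) []
       if ds = [] then n
       else ds.foldl (fun latest v => max latest (PySem.List.pyGetD config v 0)) 0))
    0 (List.replicate n.toNat (0 : Int)) (by simp) n.toNat le_rfl
  rw [hsf.2 w hw, if_pos hw]
  simp only [PySem.List.pyGetD_natCast]
  rw [hdget w hw]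
  rfl


-- ---- B's last loop ----
lemma pv_last_none_iff (N : Nat) (config : List Int) (arcs : List (Int × Int)) :
    pvB_last N config arcs = none
      ↔ arcs.any (fun vu => decide (pvCfg config vu.1 ≤ pvCfg config vu.2)) := by
  unfold pvB_last
  apply pv_bindfold_none_iff
  intro a x
  simp only [pvCfg]
  split_ifs with h
  · simp [h]
  · rcases h2 : PySem.List.pyGetD a x.2 none with _ | l
    · simp [h, h2]
    · dsimp only
      split_ifs <;> simp [h]


-- bucket invariant of B's last loop
lemma pv_lastfold (N : Nat) (config : List Int) (l : List (Int × Int))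
    (hvalid : ∀ vu ∈ l, ¬ (pvCfg config vu.1 ≤ pvCfg config vu.2))
    (hk : ∀ vu ∈ l, -(N : Int) ≤ vu.2 ∧ vu.2 < (N : Int)) :
    ∀ acc : List (Option Int), acc.length = N →
      ∃ r, l.foldl (fun st vu => st.bind (fun last =>
          let pv := PySem.List.pyGetD config vu.1 0
          if pv ≤ PySem.List.pyGetD config vu.2 0 then none
          else
            match PySem.List.pyGetD last vu.2 none with
            | none => some (PySem.List.pySetD last vu.2 (some pv))
            | some l => if l < pv then some (PySem.List.pySetD last vu.2 (some pv))
                        else some last))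
        (some acc) = some r ∧ r.length = N ∧
        ∀ w, w < N → r.getD w none
          = ((l.filter (fun vu => pvW N vu.2 == w)).map Prod.fst).foldl
              (pvOMstep config) (acc.getD w none) := by
  induction l with
  | nil => exact fun acc hacc => ⟨acc, rfl, hacc, fun w hw => rfl⟩
  | cons vu t ih =>
    intro acc hacc
    have hv := hvalid vu (List.mem_cons_self ..)
    obtain ⟨hk1, hk2⟩ := hk vu (List.mem_cons_self ..)
    simp only [List.foldl_cons, Option.bind_some]
    rw [if_neg (show ¬ (PySem.List.pyGetD config vu.1 0 ≤ PySem.List.pyGetD config vu.2 0) from hv)]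
    rw [pv_getD_wrap acc vu.2 none (by omega) (by omega)]
    have hacc' : pvW acc.length vu.2 = pvW N vu.2 := by rw [hacc]
    rw [hacc']
    have hWlt : pvW N vu.2 < N := pvW_lt N vu.2 hk1 hk2
    -- the updated accumulator, in both match branches
    have hupd : ∀ acc2 : List (Option Int), acc2.length = N →
        (∀ w, w < N → acc2.getD w none =
          (if pvW N vu.2 = w then pvOMstep config (acc.getD w none) vu.1
           else acc.getD w none)) →
        (∃ r, t.foldl (fun st vu => st.bind (fun last =>
            let pv := PySem.List.pyGetD config vu.1 0
            if pv ≤ PySem.List.pyGetD config vu.2 0 then none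
            else
              match PySem.List.pyGetD last vu.2 none with
              | none => some (PySem.List.pySetD last vu.2 (some pv))
              | some l => if l < pv then some (PySem.List.pySetD last vu.2 (some pv))
                          else some last))
          (some acc2) = some r ∧ r.length = N ∧
          ∀ w, w < N → r.getD w none
            = (((vu :: t).filter (fun vu => pvW N vu.2 == w)).map Prod.fst).foldl
                (pvOMstep config) (acc.getD w none)) := by
      intro acc2 hlen2 hget2
      obtain ⟨r, hr, hrlen, hrget⟩ := ih
        (fun x hx => hvalid x (List.mem_cons_of_mem _ hx))
        (fun x hx => hk x (List.mem_cons_of_mem _ hx)) acc2 hlen2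
      refine ⟨r, hr, hrlen, fun w hw => ?_⟩
      rw [hrget w hw, List.filter_cons]
      by_cases hbw : pvW N vu.2 = w
      · have : (pvW N vu.2 == w) = true := by simpa using hbw
        rw [this]
        simp only [if_true, List.map_cons, List.foldl_cons]
        rw [hget2 w hw, if_pos hbw]
      · have : (pvW N vu.2 == w) = false := by simpa using hbw
        simp only [this, Bool.false_eq_true, if_false]
        rw [hget2 w hw, if_neg hbw]
    rcases hm : acc.getD (pvW N vu.2) none with _ | mval
    · dsimp only
      rw [pv_setD_wrap acc vu.2 _ (by omega) (by omega), hacc']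
      apply hupd _ (by simp [hacc])
      intro w hw
      by_cases hbw : pvW N vu.2 = w
      · rw [if_pos hbw, ← hbw, List.getD_eq_getElem?_getD,
          List.getElem?_set_self (by omega), Option.getD_some, hm]
        rfl
      · rw [if_neg hbw, List.getD_eq_getElem?_getD, List.getElem?_set_ne hbw,
          ← List.getD_eq_getElem?_getD]
    · dsimp only
      by_cases hlt : mval < PySem.List.pyGetD config vu.1 0
      · rw [if_pos hlt, pv_setD_wrap acc vu.2 _ (by omega) (by omega), hacc']
        apply hupd _ (by simp [hacc])
        intro w hw
        by_cases hbw : pvW N vu.2 = w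
        · rw [if_pos hbw, ← hbw, List.getD_eq_getElem?_getD,
            List.getElem?_set_self (by omega), Option.getD_some, hm]
          simp only [pvOMstep, pvCfg]
          rw [if_pos hlt]
        · rw [if_neg hbw, List.getD_eq_getElem?_getD, List.getElem?_set_ne hbw,
            ← List.getD_eq_getElem?_getD]
      · rw [if_neg hlt]
        apply hupd acc hacc
        intro w hw
        by_cases hbw : pvW N vu.2 = w
        · rw [if_pos hbw, ← hbw, hm]
          simp only [pvOMstep, pvCfg]
          rw [if_neg hlt]
        · rw [if_neg hbw]


lemma pv_last_some (N : Nat) (config : List Int) (arcs : List (Int × Int))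
    (hvalid : ∀ vu ∈ arcs, ¬ (pvCfg config vu.1 ≤ pvCfg config vu.2))
    (hk : ∀ vu ∈ arcs, -(N : Int) ≤ vu.2 ∧ vu.2 < (N : Int)) :
    ∃ lastL, pvB_last N config arcs = some lastL ∧ lastL.length = N ∧
      ∀ w, w < N → lastL.getD w none = pvLuO N config arcs w := by
  obtain ⟨r, hr, hrlen, hrget⟩ := pv_lastfold N config arcs hvalid hk
    (List.replicate N none) (by simp)
  refine ⟨r, hr, hrlen, fun w hw => ?_⟩
  rw [hrget w hw]
  simp [pvLuO, pvDepd]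


lemma pv_om_run (config : List Int) (ds : List Int) (m : Int) :
    ds.foldl (pvOMstep config) (some m)
      = some (ds.foldl (fun m v => max m (pvCfg config v)) m) := by
  induction ds generalizing m with
  | nil => simp
  | cons v t ih =>
    simp only [List.foldl_cons]
    have : pvOMstep config (some m) v = some (max m (pvCfg config v)) := by
      simp only [pvOMstep]
      split_ifs with h
      · rw [max_eq_right h.le]
      · rw [max_eq_left (not_lt.1 h)]
    rw [this, ih]


lemma pv_luO_none_iff (N : Nat) (config : List Int) (arcs : List (Int × Int)) (w : Nat) :
    pvLuO N config arcs w = none ↔ pvDepd N arcs w = [] := by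
  unfold pvLuO
  cases h : pvDepd N arcs w with
  | nil => simp
  | cons v t =>
    simp only [List.foldl_cons]
    have : pvOMstep config none v = some (pvCfg config v) := rfl
    rw [this, pv_om_run]
    simp


lemma pv_luO_some (N : Nat) (config : List Int) (arcs : List (Int × Int)) (w : Nat)
    (hpos : ∀ v ∈ pvDepd N arcs w, 0 ≤ pvCfg config v) (hne : pvDepd N arcs w ≠ []) :
    pvLuO N config arcs w
      = some ((pvDepd N arcs w).foldl (fun m v => max m (pvCfg config v)) 0) := by
  unfold pvLuO
  cases h : pvDepd N arcs w with
  | nil => exact absurd h hne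
  | cons v t =>
    simp only [List.foldl_cons]
    have h1 : pvOMstep config none v = some (pvCfg config v) := rfl
    rw [h1, pv_om_run]
    congr 1
    have : max 0 (pvCfg config v) = pvCfg config v :=
      max_eq_right (hpos v (h ▸ List.mem_cons_self ..))
    rw [this]


-- ---- B's expire loop ----
lemma pv_countfold (N : Nat) (l : List (Option Int)) (acc : List Int) (hacc : acc.length = N)
    (hval : ∀ e ∈ l, ∀ v, e = some v → 0 ≤ v ∧ v < (N : Int)) :
    (l.foldl (fun ex e => match e with
        | none => ex
        | some v => PySem.List.pySetD ex v (PySem.List.pyGetD ex v 0 + 1)) acc).length = N ∧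
    ∀ t, t < N →
      (l.foldl (fun ex e => match e with
          | none => ex
          | some v => PySem.List.pySetD ex v (PySem.List.pyGetD ex v 0 + 1)) acc).getD t 0
        = acc.getD t 0 + (l.countP (fun e => e == some (t : Int)) : Int) := by
  induction l generalizing acc with
  | nil => simp [hacc]
  | cons e t ih =>
    simp only [List.foldl_cons]
    cases e with
    | none =>
      dsimp only
      obtain ⟨rlen, rget⟩ := ih acc hacc (fun e he v hv => hval e (List.mem_cons_of_mem _ he) v hv)
      refine ⟨rlen, fun u hu => ?_⟩
      rw [rget u hu]
      simp
    | some v =>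
      dsimp only
      obtain ⟨hv0, hvN⟩ := hval (some v) (List.mem_cons_self ..) v rfl
      have hb1 : -(acc.length : Int) ≤ v := by omega
      have hb2 : v < (acc.length : Int) := by omega
      rw [pv_getD_wrap acc v 0 hb1 hb2, pv_setD_wrap acc v _ hb1 hb2]
      have hvW : pvW acc.length v = v.toNat := by unfold pvW; rw [if_pos hv0]
      set acc' := acc.set (pvW acc.length v) (acc.getD (pvW acc.length v) 0 + 1) with hacc'
      have hlen' : acc'.length = N := by simp [hacc', hacc]
      obtain ⟨rlen, rget⟩ := ih acc' hlen' (fun e he v hv => hval e (List.mem_cons_of_mem _ he) v hv)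
      refine ⟨rlen, fun u hu => ?_⟩
      rw [rget u hu]
      by_cases hvu : v = (u : Int)
      · have hut : v.toNat = u := by omega
        have hgu : acc'.getD u 0 = acc.getD u 0 + 1 := by
          rw [hacc', hvW, hut, List.getD_eq_getElem?_getD,
            List.getElem?_set_self (by omega), Option.getD_some]
        rw [hgu]
        have hbeq : ((some v == some (u : Int)) : Bool) = true := by simp [hvu]
        simp [List.countP_cons, hbeq]
        push_cast
        ring
      · have hne : pvW acc.length v ≠ u := by rw [hvW]; omega
        have hgu : acc'.getD u 0 = acc.getD u 0 := by
          rw [hacc', List.getD_eq_getElem?_getD, List.getElem?_set_ne hne,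
            ← List.getD_eq_getElem?_getD]
        rw [hgu]
        have hbeq : ((some v == some (u : Int)) : Bool) = false := by simpa using hvu
        simp [List.countP_cons, hbeq]

-- ---- B's sweep loop ----
lemma pv_sweep_char (N : Nat) (expire : List Int) :
    pvB_sweep N expire
      = ((List.range N).foldl (fun m k => max m (pvAct expire (k + 1))) 0, pvAct expire N) := by
  unfold pvB_sweep
  induction N with
  | zero => simp [pvAct]
  | succ N ih =>
    simp only [List.range_succ, List.foldl_append]
    rw [ih]
    simp only [List.foldl_cons, List.foldl_nil, PySem.List.pyGetD_natCast]
    have hact : pvAct expire N + 1 - expire.getD N 0 = pvAct expire (N + 1) := by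
      unfold pvAct
      rw [List.range_succ, List.map_append, List.sum_append]
      push_cast
      simp only [List.map_cons, List.map_nil, List.sum_cons, List.sum_nil]
      ring
    rw [hact]
    congr 1
    split_ifs with h
    · exact (max_eq_right h.le).symm
    · exact (max_eq_left (not_lt.1 h)).symm


-- ---- A's step loop ----
lemma pv_steps_some (n : Int) (config order : List Int) (dependencies : List (List Int))
    (last_use : List Int)
    (hok : ∀ k, k < n.toNat →
      ¬ ((PySem.List.pyGetD dependencies (PySem.List.pyGetD order (k : Int) 0) []).any
           (fun dep => (k : Int) ≤ PySem.List.pyGetD config dep 0) = true)) :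
    pvA_steps n config order dependencies last_use
      = some ((List.range n.toNat).foldl (fun m (k : Nat) =>
          max m (((PySem.List.slice order none (some ((k : Int) + 1))).map
            (fun v => if (k : Int) < PySem.List.pyGetD last_use v 0 then (1 : Int) else 0)).sum)) 0) := by
  unfold pvA_steps
  dsimp only
  refine pv_bindfold_some
    (F := fun max_registers (step : Nat) =>
      if ((PySem.List.pyGetD dependencies (PySem.List.pyGetD order (step : Int) 0) []).any
          fun dep => decide ((step : Int) ≤ PySem.List.pyGetD config dep 0)) = true then none
      else some (max max_registers (((PySem.List.slice order none (some ((step : Int) + 1))).map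
        (fun v => if (step : Int) < PySem.List.pyGetD last_use v 0 then (1 : Int) else 0)).sum)))
    (l := List.range n.toNat) _ (fun a k hkmem => ?_) 0
  have hk : k < n.toNat := List.mem_range.1 hkmem
  dsimp only
  rw [if_neg (hok k hk)]


-- shared config reads land in [0, n) for wrapped in-range indices
lemma pv_cfg_range (n : Int) (config : List Int) (hn : (config.length : Int) = n)
    (hrange : ∀ x ∈ config, 0 ≤ x ∧ x < n) (i : Int)
    (h1 : -(n.toNat : Int) ≤ i) (h2 : i < (n.toNat : Int)) :
    0 ≤ pvCfg config i ∧ pvCfg config i < n := by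
  have hlen : config.length = n.toNat := by omega
  have hb1 : -(config.length : Int) ≤ i := by omega
  have hb2 : i < (config.length : Int) := by omega
  have hW : pvW config.length i < config.length := pvW_lt _ _ hb1 hb2
  have : pvCfg config i = config[pvW config.length i] := by
    unfold pvCfg
    rw [pv_getD_wrap config i 0 hb1 hb2, List.getD_eq_getElem?_getD,
      List.getElem?_eq_getElem hW, Option.getD_some]
  rw [this]
  exact hrange _ (config.getElem_mem hW)

lemma pv_depd_elem (N : Nat) (arcs : List (Int × Int)) (w : Nat) :
    ∀ v ∈ pvDepd N arcs w, ∃ x ∈ arcs, x.1 = v ∧ pvW N x.2 = w := by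
  intro v hv
  unfold pvDepd at hv
  obtain ⟨x, hx, rfl⟩ := List.mem_map.1 hv
  obtain ⟨hxmem, hxw⟩ := List.mem_filter.1 hx
  exact ⟨x, hxmem, rfl, by simpa using hxw⟩

-- A's last_use value: bounds, and the key inequality position < last use
lemma pv_lu_facts (n : Int) (config : List Int) (arcs : List (Int × Int))
    (hn : (config.length : Int) = n)
    (hrange : ∀ x ∈ config, 0 ≤ x ∧ x < n)
    (harc : ∀ vu ∈ arcs, (-(n.toNat : Int) ≤ vu.1 ∧ vu.1 < (n.toNat : Int)) ∧
        (-(n.toNat : Int) ≤ vu.2 ∧ vu.2 < (n.toNat : Int)))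
    (hval : ∀ vu ∈ arcs, ¬ (pvCfg config vu.1 ≤ pvCfg config vu.2))
    (w : Nat) (hw : w < n.toNat) (hne : pvDepd n.toNat arcs w ≠ []) :
    0 ≤ pvLu n config arcs w ∧ config.getD w 0 < pvLu n config arcs w ∧
      pvLu n config arcs w < n := by
  have helem : ∀ v ∈ pvDepd n.toNat arcs w,
      config.getD w 0 < pvCfg config v ∧ 0 ≤ pvCfg config v ∧ pvCfg config v < n := by
    intro v hv
    obtain ⟨x, hxmem, hx1, hx2⟩ := pv_depd_elem n.toNat arcs w v hv
    obtain ⟨hb1, hb2⟩ := harc x hxmem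
    have hc1 := pv_cfg_range n config hn hrange x.1 hb1.1 hb1.2
    have hcw : pvCfg config x.2 = config.getD w 0 := by
      unfold pvCfg
      rw [pv_getD_wrap config x.2 0 (by omega) (by omega)]
      congr 1
      rw [← hx2]
      congr 1
      omega
    have hvx := hval x hxmem
    rw [hcw] at hvx
    rw [← hx1]
    exact ⟨by omega, hc1.1, hc1.2⟩
  unfold pvLu
  rw [if_neg hne]
  rcases hds : pvDepd n.toNat arcs w with _ | ⟨v0, t⟩
  · exact absurd hds hne
  · rw [← hds]
    have hfold : (pvDepd n.toNat arcs w).foldl (fun m v => max m (pvCfg config v)) 0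
        = ((pvDepd n.toNat arcs w).map (pvCfg config)).foldl max 0 := by
      rw [List.foldl_map]
    have hge := PySem.List.le_foldl_max_int (pvDepd n.toNat arcs w) (pvCfg config) 0
    have hv0 : config.getD w 0 < pvCfg config v0 :=
      (helem v0 (hds ▸ List.mem_cons_self ..)).1
    have hv0le := hge.2 v0 (hds ▸ List.mem_cons_self ..)
    refine ⟨by omega, by omega, ?_⟩
    rw [hfold]
    rcases PySem.List.foldl_max_mem ((pvDepd n.toNat arcs w).map (pvCfg config)) 0 with h | h
    · rw [h]
      have := (helem v0 (hds ▸ List.mem_cons_self ..)).2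
      omega
    · obtain ⟨v1, hv1, hv1e⟩ := List.mem_map.1 h
      rw [← hv1e]
      exact (helem v1 hv1).2.2

-- summing per-step expiry buckets counts every vertex expiring by step m - 1 once
lemma pv_sum_buckets (N : Nat) (lastL : List (Option Int)) (m : Nat) :
    ∑ t ∈ Finset.range m, ((((Finset.range N).filter
        (fun w => lastL.getD w none = some (t : Int))).card : Int))
      = ((((Finset.range N).filter
          (fun w => ∃ v, lastL.getD w none = some v ∧ 0 ≤ v ∧ v < (m : Int))).card : Int)) := by
  induction m with
  | zero =>
    rw [Finset.sum_range_zero, Finset.filter_false_of_mem, Finset.card_empty]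
    · rfl
    · rintro w _ ⟨v, _, h1, h2⟩
      simp at h2
      omega
  | succ m ih =>
    rw [Finset.sum_range_succ, ih]
    have hsplit : (Finset.range N).filter
          (fun w => ∃ v, lastL.getD w none = some v ∧ 0 ≤ v ∧ v < ((m + 1 : Nat) : Int))
        = ((Finset.range N).filter
            (fun w => ∃ v, lastL.getD w none = some v ∧ 0 ≤ v ∧ v < (m : Int)))
          ∪ ((Finset.range N).filter (fun w => lastL.getD w none = some (m : Int))) := by
      ext w
      simp only [Finset.mem_filter, Finset.mem_union]
      constructor
      · rintro ⟨hw, v, hv, h0, hlt⟩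
        by_cases hvm : v = (m : Int)
        · exact Or.inr ⟨hw, hvm ▸ hv⟩
        · exact Or.inl ⟨hw, v, hv, h0, by push_cast at hlt ⊢; omega⟩
      · rintro (⟨hw, v, hv, h0, hlt⟩ | ⟨hw, hv⟩)
        · exact ⟨hw, v, hv, h0, by push_cast at hlt ⊢; omega⟩
        · exact ⟨hw, (m : Int), hv, by positivity, by push_cast; omega⟩
    have hdisj : Disjoint ((Finset.range N).filter
          (fun w => ∃ v, lastL.getD w none = some v ∧ 0 ≤ v ∧ v < (m : Int)))
        ((Finset.range N).filter (fun w => lastL.getD w none = some (m : Int))) := by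
      rw [Finset.disjoint_left]
      rintro w h1 h2
      obtain ⟨-, v, hv, -, hlt⟩ := Finset.mem_filter.1 h1
      obtain ⟨-, hv2⟩ := Finset.mem_filter.1 h2
      rw [hv2] at hv
      obtain rfl := Option.some.injEq .. ▸ hv
      omega
    rw [hsplit, Finset.card_union_of_disjoint hdisj]
    push_cast
    ring

-- list countP as a Finset card over range (index form)
lemma pv_countP_range (N : Nat) (p : Nat → Bool) :
    ((List.range N).countP p) = ((Finset.range N).filter (fun w => p w = true)).card := by
  simp [Finset.range, Finset.filter, Finset.card, Multiset.range, Multiset.filter_coe,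
    List.countP_eq_length_filter]


lemma pv_sum_range (n : Nat) (f : Nat → Int) :
    ((List.range n).map f).sum = ∑ j ∈ Finset.range n, f j := by
  rw [eq_comm]
  simp [Finset.range, Finset.sum, Multiset.range]


-- the per-step register count of A equals B's closed-form active count
lemma pv_cnt_core (n : Int) (config : List Int) (arcs : List (Int × Int))
    (o last_use : List Int) (lastL : List (Option Int)) (expire : List Int)
    (hn : (config.length : Int) = n)
    (hrange : ∀ x ∈ config, 0 ≤ x ∧ x < n)
    (harc : ∀ vu ∈ arcs, (-(n.toNat : Int) ≤ vu.1 ∧ vu.1 < (n.toNat : Int)) ∧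
        (-(n.toNat : Int) ≤ vu.2 ∧ vu.2 < (n.toNat : Int)))
    (hval : ∀ vu ∈ arcs, ¬ (pvCfg config vu.1 ≤ pvCfg config vu.2))
    (holen : o.length = config.length)
    (horder : ∀ j, j < config.length → 0 ≤ o.getD j 0 ∧ o.getD j 0 < (config.length : Int) ∧
        config.getD (o.getD j 0).toNat 0 = (j : Int))
    (hchar : ∀ i, i < config.length → o.getD (config.getD i 0).toNat 0 = (i : Int))
    (hlu : ∀ w, w < n.toNat → last_use.getD w 0 = pvLu n config arcs w)
    (hlastlen : lastL.length = n.toNat)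
    (hlastget : ∀ w, w < n.toNat → lastL.getD w none = pvLuO n.toNat config arcs w)
    (hexp : ∀ t, t < n.toNat → expire.getD t 0 = (lastL.countP (fun e => e == some (t : Int)) : Int))
    (k : Nat) (hk : k < n.toNat) :
    ((PySem.List.slice o none (some ((k : Int) + 1))).map
        (fun v => if (k : Int) < PySem.List.pyGetD last_use v 0 then (1 : Int) else 0)).sum
      = pvAct expire (k + 1) := by
  have hNlen : n.toNat = config.length := by omega
  -- A's slice is a take, and its 0/1 sum is a countP
  have h1 : ((k : Int) + 1) = ((k + 1 : Nat) : Int) := by push_cast; ring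
  rw [h1, PySem.List.slice_to_natCast]
  have h2 := PySem.List.sum_map_ite_one_zero
    (fun v => decide ((k : Int) < PySem.List.pyGetD last_use v 0)) (o.take (k + 1))
  simp only [decide_eq_true_eq] at h2
  rw [h2]
  -- o itself has no duplicates
  have honodup : o.Nodup := by
    rw [List.nodup_iff_injective_getElem]
    intro a b hab
    have hab' : o[a.1]'a.2 = o[b.1]'b.2 := hab
    have hga : o.getD a.1 0 = o[a.1]'a.2 := by
      rw [List.getD_eq_getElem?_getD, List.getElem?_eq_getElem a.2, Option.getD_some]
    have hgb : o.getD b.1 0 = o[b.1]'b.2 := by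
      rw [List.getD_eq_getElem?_getD, List.getElem?_eq_getElem b.2, Option.getD_some]
    have ha := (horder a.1 (holen ▸ a.2)).2.2
    have hb := (horder b.1 (holen ▸ b.2)).2.2
    rw [hga, hab', ← hgb] at ha
    rw [ha] at hb
    exact Fin.ext (by exact_mod_cast hb)
  -- the first k+1 entries of o are exactly the vertices evaluated by step k
  have hperm : (o.take (k + 1)).Perm
      (((List.range n.toNat).filter (fun w => decide (config.getD w 0 ≤ (k : Int)))).map
        (fun w => ((w : Nat) : Int))) := by
    rw [List.perm_ext_iff_of_nodup (honodup.sublist (List.take_sublist ..))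
      (((List.nodup_range).filter _).map (fun a b hab => by exact_mod_cast hab))]
    intro x
    rw [List.mem_take_iff_getElem]
    constructor
    · rintro ⟨j, hj, rfl⟩
      have hj' : j < o.length := by omega
      have hjlen : j < config.length := by omega
      have hjk : j < k + 1 := by omega
      obtain ⟨ho0, ho1, ho2⟩ := horder j hjlen
      have hgd : o.getD j 0 = o[j]'hj' := by
        rw [List.getD_eq_getElem?_getD, List.getElem?_eq_getElem hj', Option.getD_some]
      rw [List.mem_map]
      rw [hgd] at ho0 ho1 ho2
      refine ⟨(o[j]'hj').toNat, ?_, by omega⟩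
      rw [List.mem_filter, List.mem_range, decide_eq_true_eq]
      constructor
      · omega
      · rw [ho2]
        omega
    · rintro hx
      obtain ⟨w, hwmem, rfl⟩ := List.mem_map.1 hx
      obtain ⟨hwN, hwk⟩ := List.mem_filter.1 hwmem
      rw [List.mem_range] at hwN
      rw [decide_eq_true_eq] at hwk
      have hwlen : w < config.length := by omega
      have hcw := hchar w hwlen
      have hcb : 0 ≤ config.getD w 0 := by
        have : config.getD w 0 = config[w] := by
          rw [List.getD_eq_getElem?_getD, List.getElem?_eq_getElem hwlen, Option.getD_some]
        rw [this]
        exact (hrange _ (config.getElem_mem hwlen)).1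
      have hjk : (config.getD w 0).toNat < k + 1 := by omega
      have hjlen : (config.getD w 0).toNat < o.length := by
        rw [holen]
        omega
      refine ⟨(config.getD w 0).toNat, by omega, ?_⟩
      have hthis : o.getD (config.getD w 0).toNat 0 = o[(config.getD w 0).toNat]'hjlen := by
        rw [List.getD_eq_getElem?_getD, List.getElem?_eq_getElem hjlen, Option.getD_some]
      rw [← hthis]
      exact hcw
  rw [hperm.countP_eq, List.countP_map, List.countP_filter, pv_countP_range]
  -- switch to the proposition form of the step-k live-register predicate
  have hEdec : ∀ w, w < n.toNat →
      (((k : Int) < PySem.List.pyGetD last_use ((w : Nat) : Int) 0 ∧ config.getD w 0 ≤ (k : Int))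
        ↔ (config.getD w 0 ≤ (k : Int) ∧
           ¬ ∃ v, lastL.getD w none = some v ∧ 0 ≤ v ∧ v < ((k + 1 : Nat) : Int))) := by
    intro w hw
    rw [PySem.List.pyGetD_natCast, hlu w hw, hlastget w hw]
    by_cases hde : pvDepd n.toNat arcs w = []
    · have hnone : pvLuO n.toNat config arcs w = none := (pv_luO_none_iff ..).2 hde
      have hlun : pvLu n config arcs w = n := by unfold pvLu; rw [if_pos hde]
      rw [hnone, hlun]
      constructor
      · rintro ⟨-, hc⟩
        exact ⟨hc, by rintro ⟨v, hv, -⟩; exact absurd hv (by simp)⟩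
      · rintro ⟨hc, -⟩
        exact ⟨by omega, hc⟩
    · have hpos : ∀ v ∈ pvDepd n.toNat arcs w, 0 ≤ pvCfg config v := by
        intro v hv
        obtain ⟨x, hxmem, hx1, -⟩ := pv_depd_elem n.toNat arcs w v hv
        obtain ⟨hb1, -⟩ := harc x hxmem
        rw [← hx1]
        exact (pv_cfg_range n config hn hrange x.1 hb1.1 hb1.2).1
      have hsome : pvLuO n.toNat config arcs w = some (pvLu n config arcs w) := by
        rw [pv_luO_some n.toNat config arcs w hpos hde]
        unfold pvLu
        rw [if_neg hde]
      obtain ⟨hl0, hlgt, hlltn⟩ := pv_lu_facts n config arcs hn hrange harc hval w hw hde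
      rw [hsome]
      constructor
      · rintro ⟨hlk, hc⟩
        refine ⟨hc, ?_⟩
        rintro ⟨v, hv, -, hvk⟩
        obtain rfl := Option.some.injEq .. ▸ hv
        push_cast at hvk
        omega
      · rintro ⟨hc, hne2⟩
        refine ⟨?_, hc⟩
        by_contra hnk
        exact hne2 ⟨pvLu n config arcs w, rfl, hl0, by push_cast; omega⟩
  have hfilter1 : (Finset.range n.toNat).filter
        (fun w => (((fun v => decide ((k : Int) < PySem.List.pyGetD last_use v 0)) ∘
            (fun w : Nat => ((w : Nat) : Int))) w && decide (config.getD w 0 ≤ (k : Int))) = true)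
      = (Finset.range n.toNat).filter
        (fun w => config.getD w 0 ≤ (k : Int) ∧
          ¬ ∃ v, lastL.getD w none = some v ∧ 0 ≤ v ∧ v < ((k + 1 : Nat) : Int)) := by
    apply Finset.filter_congr
    intro w hw
    rw [Finset.mem_range] at hw
    simp only [Function.comp, Bool.and_eq_true, decide_eq_true_eq]
    exact hEdec w hw
  rw [hfilter1]
  -- split the evaluated-by-step-k set by expiry
  have hsplitcard : (((Finset.range n.toNat).filter
        (fun w => config.getD w 0 ≤ (k : Int) ∧
          ¬ ∃ v, lastL.getD w none = some v ∧ 0 ≤ v ∧ v < ((k + 1 : Nat) : Int))).card)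
      + (((Finset.range n.toNat).filter
        (fun w => config.getD w 0 ≤ (k : Int) ∧
          ∃ v, lastL.getD w none = some v ∧ 0 ≤ v ∧ v < ((k + 1 : Nat) : Int))).card)
      = ((Finset.range n.toNat).filter (fun w => config.getD w 0 ≤ (k : Int))).card := by
    rw [← Finset.filter_filter, ← Finset.filter_filter, Nat.add_comm]
    exact Finset.filter_card_add_filter_neg_card_eq_card _
  -- a vertex that expires by step k was evaluated by step k
  have hEC : (Finset.range n.toNat).filter
        (fun w => config.getD w 0 ≤ (k : Int) ∧
          ∃ v, lastL.getD w none = some v ∧ 0 ≤ v ∧ v < ((k + 1 : Nat) : Int))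
      = (Finset.range n.toNat).filter
        (fun w => ∃ v, lastL.getD w none = some v ∧ 0 ≤ v ∧ v < ((k + 1 : Nat) : Int)) := by
    apply Finset.filter_congr
    intro w hw
    rw [Finset.mem_range] at hw
    constructor
    · exact fun h => h.2
    · rintro ⟨v, hv, h0, hvk⟩
      refine ⟨?_, v, hv, h0, hvk⟩
      rw [hlastget w hw] at hv
      have hde : pvDepd n.toNat arcs w ≠ [] := by
        intro hc
        rw [(pv_luO_none_iff ..).2 hc] at hv
        exact absurd hv (by simp)
      have hpos : ∀ v ∈ pvDepd n.toNat arcs w, 0 ≤ pvCfg config v := by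
        intro v hv'
        obtain ⟨x, hxmem, hx1, -⟩ := pv_depd_elem n.toNat arcs w v hv'
        obtain ⟨hb1, -⟩ := harc x hxmem
        rw [← hx1]
        exact (pv_cfg_range n config hn hrange x.1 hb1.1 hb1.2).1
      have hsome : pvLuO n.toNat config arcs w = some (pvLu n config arcs w) := by
        rw [pv_luO_some n.toNat config arcs w hpos hde]
        unfold pvLu
        rw [if_neg hde]
      rw [hsome] at hv
      obtain rfl := Option.some.injEq .. ▸ hv
      obtain ⟨-, hlgt, -⟩ := pv_lu_facts n config arcs hn hrange harc hval w hw hde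
      push_cast at hvk
      omega
  -- exactly k+1 vertices are evaluated by step k
  have hcardC : ((Finset.range n.toNat).filter (fun w => config.getD w 0 ≤ (k : Int))).card
      = k + 1 := by
    rw [← Finset.card_range (k + 1)]
    apply Finset.card_nbij' (i := fun w => (config.getD w 0).toNat)
      (j := fun t => (o.getD t 0).toNat)
    · intro w hw
      simp only [Finset.coe_filter, Set.mem_setOf_eq, Finset.mem_range, Finset.mem_coe] at hw ⊢
      obtain ⟨hwN, hwk⟩ := hw
      have hwlen : w < config.length := by omega
      have hcb : 0 ≤ config.getD w 0 := by
        have : config.getD w 0 = config[w] := by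
          rw [List.getD_eq_getElem?_getD, List.getElem?_eq_getElem hwlen, Option.getD_some]
        rw [this]
        exact (hrange _ (config.getElem_mem hwlen)).1
      omega
    · intro t ht
      simp only [Finset.mem_coe, Finset.mem_range] at ht
      simp only [Finset.coe_filter, Set.mem_setOf_eq, Finset.mem_range]
      have htlen : t < config.length := by omega
      obtain ⟨ho0, ho1, ho2⟩ := horder t htlen
      constructor
      · omega
      · rw [ho2]
        omega
    · intro w hw
      simp only [Finset.coe_filter, Set.mem_setOf_eq, Finset.mem_range] at hw
      have hwlen : w < config.length := by omega
      have := hchar w hwlen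
      dsimp only
      omega
    · intro t ht
      simp only [Finset.mem_coe, Finset.mem_range] at ht
      have htlen : t < config.length := by omega
      have := (horder t htlen).2.2
      dsimp only
      omega
  -- B's side: expiry buckets sum to the number of expired vertices
  have hexpcard : ∀ t, t < n.toNat → expire.getD t 0
      = (((Finset.range n.toNat).filter (fun w => lastL.getD w none = some (t : Int))).card : Int) := by
    intro t ht
    rw [hexp t ht]
    have h1 : lastL.countP (fun e => e == some (t : Int))
        = ((Finset.range n.toNat).filter (fun w => lastL.getD w none = some (t : Int))).card := by
      conv_lhs => rw [← pv_map_getD_range lastL none]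
      rw [List.countP_map, hlastlen, pv_countP_range]
      apply congrArg Finset.card
      apply Finset.filter_congr
      intro w hw
      simp [Function.comp]
    rw [h1]
  have hact : pvAct expire (k + 1)
      = ((k + 1 : Nat) : Int) - (((Finset.range n.toNat).filter
          (fun w => ∃ v, lastL.getD w none = some v ∧ 0 ≤ v ∧ v < ((k + 1 : Nat) : Int))).card : Int) := by
    unfold pvAct
    rw [pv_sum_range]
    have hsum : ∑ t ∈ Finset.range (k + 1), expire.getD t 0
        = ∑ t ∈ Finset.range (k + 1), (((Finset.range n.toNat).filter
            (fun w => lastL.getD w none = some (t : Int))).card : Int) := by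
      apply Finset.sum_congr rfl
      intro t ht
      rw [Finset.mem_range] at ht
      exact hexpcard t (by omega)
    rw [hsum, pv_sum_buckets]
  rw [hact]
  rw [hEC] at hsplitcard
  rw [hcardC] at hsplitcard
  push_cast at hsplitcard ⊢
  omega
-- ===== VERDICT (by name: the statement is the Claim_ definition above) =====
theorem simulate_registers_spec : Claim_equal_simulate_registers := by
  intro n arcs config _hDom hPre
  unfold Spec_simulate_registers simulate_registers simulate_registers_alt
  by_cases hL : PySem.List.len config ≠ n
  · rw [if_pos hL, if_pos hL]
  · rw [if_neg hL, if_neg hL]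
    rw [not_not] at hL
    have hn : (config.length : Int) = n := by rw [PySem.List.len_eq] at hL; exact_mod_cast hL
    rw [pv_seen_eq n config hn]
    rcases hperm : pvA_perm n config with _ | ou
    · rfl
    · obtain ⟨o, u⟩ := ou
      simp only [Option.map_some]
      obtain ⟨hrange, hnd, holen, hchar⟩ := pv_perm_char n config o u hn hperm
      have hPre' := hPre ⟨hL, hrange, hnd⟩
      have hN0 : 0 ≤ n := by omega
      have harc : ∀ vu ∈ arcs, (-(n.toNat : Int) ≤ vu.1 ∧ vu.1 < (n.toNat : Int)) ∧
          (-(n.toNat : Int) ≤ vu.2 ∧ vu.2 < (n.toNat : Int)) := by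
        intro vu hvu
        have := hPre' vu hvu
        constructor <;> constructor <;> omega
      obtain ⟨hdeplen, hdeptlen, hdeps, hdepd⟩ := pv_adj_char n.toNat arcs harc
      have hlu := pv_lastuse_char n config arcs hPre' hN0
      have horder := pv_order_inv n config o u hn hperm
      by_cases hval : ∀ vu ∈ arcs, ¬ (pvCfg config vu.1 ≤ pvCfg config vu.2)
      · -- every arc valid: both sides return the max register count
        obtain ⟨lastL, hlast, hlastlen, hlastget⟩ :=
          pv_last_some n.toNat config arcs hval (fun vu hvu => (harc vu hvu).2)
        rw [hlast]
        -- expiry values are in range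
        have hlval : ∀ e ∈ lastL, ∀ v, e = some v → 0 ≤ v ∧ v < (n.toNat : Int) := by
          intro e he v hv
          subst hv
          obtain ⟨w, hw, hgw⟩ := List.mem_iff_getElem.1 he
          have hwN : w < n.toNat := by omega
          have hgd : lastL.getD w none = some v := by
            rw [List.getD_eq_getElem?_getD, List.getElem?_eq_getElem hw, Option.getD_some, hgw]
          rw [hlastget w hwN] at hgd
          have hde : pvDepd n.toNat arcs w ≠ [] := by
            intro hc
            rw [(pv_luO_none_iff ..).2 hc] at hgd
            exact absurd hgd (by simp)
          have hpos : ∀ x ∈ pvDepd n.toNat arcs w, 0 ≤ pvCfg config x := by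
            intro x hx
            obtain ⟨y, hymem, hy1, -⟩ := pv_depd_elem n.toNat arcs w x hx
            rw [← hy1]
            exact (pv_cfg_range n config hn hrange y.1 (harc y hymem).1.1 (harc y hymem).1.2).1
          have hsome : pvLuO n.toNat config arcs w = some (pvLu n config arcs w) := by
            rw [pv_luO_some n.toNat config arcs w hpos hde]
            unfold pvLu
            rw [if_neg hde]
          rw [hsome] at hgd
          have hveq : pvLu n config arcs w = v := Option.some.injEq .. ▸ hgd
          obtain ⟨h0, -, hlt⟩ := pv_lu_facts n config arcs hn hrange harc hval w hwN hde
          omega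
        have hexp0 := pv_countfold n.toNat lastL (List.replicate n.toNat 0) (by simp) hlval
        have hexp : ∀ t, t < n.toNat → (pvB_expire n.toNat lastL).getD t 0
            = (lastL.countP (fun e => e == some (t : Int)) : Int) := by
          intro t ht
          have := hexp0.2 t ht
          unfold pvB_expire
          rw [this]
          simp
        dsimp only
        rw [pv_sweep_char]
        dsimp only
        -- A's dependency checks all pass
        have hok : ∀ k, k < n.toNat →
            ¬ ((PySem.List.pyGetD (pvA_adj n.toNat arcs).1
                  (PySem.List.pyGetD o (k : Int) 0) []).any
                (fun dep => (k : Int) ≤ PySem.List.pyGetD config dep 0) = true) := by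
          intro k hk
          rw [PySem.List.pyGetD_natCast]
          have hklen : k < config.length := by omega
          obtain ⟨ho0, ho1, ho2⟩ := horder k hklen
          have hgdep : PySem.List.pyGetD (pvA_adj n.toNat arcs).1 (o.getD k 0) []
              = pvDeps n.toNat arcs (o.getD k 0).toNat := by
            rw [pv_getD_wrap _ _ _ (by omega) (by omega)]
            have hWv : pvW (pvA_adj n.toNat arcs).1.length (o.getD k 0) = (o.getD k 0).toNat := by
              unfold pvW
              rw [if_pos ho0]
            rw [hWv]
            exact hdeps _ (by omega)
          rw [hgdep]
          simp only [Bool.not_eq_true, List.any_eq_false]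
          intro dep hdep
          unfold pvDeps at hdep
          obtain ⟨x, hx, rfl⟩ := List.mem_map.1 hdep
          obtain ⟨hxmem, hxw⟩ := List.mem_filter.1 hx
          have hxw' : pvW n.toNat x.1 = (o.getD k 0).toNat := by simpa using hxw
          have hvx := hval x hxmem
          have hcx1 : pvCfg config x.1 = config.getD (o.getD k 0).toNat 0 := by
            unfold pvCfg
            rw [pv_getD_wrap config x.1 0 (by have := (harc x hxmem).1; omega)
              (by have := (harc x hxmem).1; omega)]
            congr 1
            rw [← hxw']
            congr 1
            omega
          rw [hcx1, ho2] at hvx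
          unfold pvCfg at hvx
          simpa using hvx
        rw [pv_steps_some n config o (pvA_adj n.toNat arcs).1
          (pvA_lastuse n config (pvA_adj n.toNat arcs).2) hok]
        congr 1
        apply PySem.List.foldl_congr_mem
        intro acc k hkmem
        rw [List.mem_range] at hkmem
        congr 1
        exact pv_cnt_core n config arcs o (pvA_lastuse n config (pvA_adj n.toNat arcs).2)
          lastL (pvB_expire n.toNat lastL) hn hrange harc hval holen horder hchar hlu
          hlastlen hlastget hexp k hkmem
      · -- some invalid arc: both sides return None
        push_neg at hval
        obtain ⟨vu, hvu, hbad⟩ := hval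
        have hBnone : pvB_last n.toNat config arcs = none := by
          rw [pv_last_none_iff, List.any_eq_true]
          exact ⟨vu, hvu, by simpa using hbad⟩
        rw [hBnone]
        have hW1lt : pvW n.toNat vu.1 < n.toNat :=
          pvW_lt _ _ (harc vu hvu).1.1 (harc vu hvu).1.2
        have hcfg1 : pvCfg config vu.1 = config.getD (pvW n.toNat vu.1) 0 := by
          unfold pvCfg
          rw [pv_getD_wrap config vu.1 0 (by have := (harc vu hvu).1; omega)
            (by have := (harc vu hvu).1; omega)]
          congr 2
          omega
        have hcb := pv_cfg_range n config hn hrange vu.1 (harc vu hvu).1.1 (harc vu hvu).1.2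
        unfold pvA_steps
        apply pv_bindfold_exists_none
        refine ⟨(pvCfg config vu.1).toNat, List.mem_range.2 (by omega), fun a => ?_⟩
        have hvert : PySem.List.pyGetD o ((pvCfg config vu.1).toNat : Int) 0
            = ((pvW n.toNat vu.1 : Nat) : Int) := by
          rw [PySem.List.pyGetD_natCast]
          have := hchar (pvW n.toNat vu.1) (by omega)
          rw [← hcfg1] at this
          exact this
        rw [hvert]
        dsimp only
        have hgdep : PySem.List.pyGetD (pvA_adj n.toNat arcs).1 ((pvW n.toNat vu.1 : Nat) : Int) []
            = pvDeps n.toNat arcs (pvW n.toNat vu.1) := by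
          rw [PySem.List.pyGetD_natCast]
          have h1 : (pvA_adj n.toNat arcs).1.getD (pvW n.toNat vu.1) [] = _ :=
            hdeps (pvW n.toNat vu.1) hW1lt
          exact h1
        rw [hgdep]
        have hmem2 : vu.2 ∈ pvDeps n.toNat arcs (pvW n.toNat vu.1) := by
          unfold pvDeps
          exact List.mem_map.2 ⟨vu, List.mem_filter.2 ⟨hvu, by simp⟩, rfl⟩
        have htest : (pvDeps n.toNat arcs (pvW n.toNat vu.1)).any
            (fun dep => ((pvCfg config vu.1).toNat : Int) ≤ PySem.List.pyGetD config dep 0) = true := by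
          rw [List.any_eq_true]
          refine ⟨vu.2, hmem2, ?_⟩
          simp only [decide_eq_true_eq]
          have : ((pvCfg config vu.1).toNat : Int) = pvCfg config vu.1 := by omega
          rw [this]
          exact hbad
        rw [if_pos htest]
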